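/-
  SEGMENT R12 OF `start_decoder` (0x116482 – 0x11655a: the submap loop 4132 of the mapping section and the `++i` of loop 4095,
  stb_vorbis_fixed.c 4132 – 4138; 48 instructions, 5 contract calls — get_bits ×3, error ×2 —, 5 check sites; entry = the head 0x116545 =
  cut310 = loop40, NOT the first address) SPLIT AT THE LOOP HEAD AND AT THE RETURNS OF THE THREE get_bits (the cuts of the farm's report
  on start_decoder.R12: cut305, cut306, cut307, the head cut310): the assertions at the cut points, the claims of the four children,
  and the composition `SegR12.of_parts` (pure logic: `ReachVia.trans`, `ReachVia.loop` with the measure `16 − r13`; no machine step).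

      R12a  0x116545–0x11654c + 0x116482–0x11648a +            the head: `j < m->submaps` (`movzx eax, byte [rbx + 10H] ; cmp eax, r13d ; jg`);
            0x116552–0x11655a                                  yes: `get_bits(f, 8)` (discarded), returns into 0x11648f (cut305);
                                                               no: `++i` (`add dword [R + 10H], 1`), `r15d = r14d`, `jmp 115f22`: R8 with i + 1
                                                               exit: AtR8 (i + 1) ∨ AtR12a j (`InR12 … cut305 j` ∧ `j < submaps`)
      R12b  0x11648f–0x116497, returns into 0x11649c (cut306)  `get_bits(f, 8)` (submap_floor)
                                                               exit: AtR12b j (`InR12 … cut306 j` ∧ `j < submaps`)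
      R12c  0x11649c–0x1164c2, returns into 0x1164c7 (cut307)  the spill of eax to `[R + 18H]`, `r12 = j`, `r15 = m + 11H + j`,
                                                               `submap_floor[j] = byte [R + 18H]` (checked store1), `get_bits(f, 8)` (submap_residue)
                                                               exit: AtR12c j (`InR12 … cut307 j` ∧ `j < submaps` ∧ r12 ∧ r15)
      R12d  0x1164c7–0x116541                                  the spill of eax, `submap_residue[j] = al` (checked store1 at m + 21H + j), the
                                                               RE-LOADED `submap_floor[j]` (checked load1 via r15) `< f->floor_count` (checked
                                                               load4), the spilled byte `[R + 18H] < f->residue_count` (checked load4), `++j`;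
                                                               a failing test: the stub 0x116502 / 0x11652f (`error(f, 20)`, `jmp 113b22`)
                                                               exit: AtR12h (j + 1) ∨ AtERR

  9 + 3 + 10 + 26 = 48 instructions = the parent's. THE TWO ERROR STUBS STAY IN R12d (26 instructions with them; exit `AtERR`, callee
  `error`): no stub child, no new label.

  WHAT IS LIVE AT THE CUTS (read off c/vorbis_f.dis 116482 … 11655a):
      0x116545 (cut310)  reads rbx (`movzx eax, byte [rbx + 10H]`: submaps), r13d (= j), rbp, rsp; on the exit arm `[R + 10H]` (the counter
                         of loop 4095, `MapLoop.cnt`) and r14d (max_submaps: no constraint). r12, r15, `[R + 18H]` are rewritten.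
      0x11648f (cut305)  eax is DISCARDED. Reads rbp, rsp, later rbx, r13d.
      0x11649c (cut306)  reads eax (stored as a byte; `submap_floor[j]` is re-loaded 0x1164e7 and TESTED: no constraint), r13d (0x1164a0),
                         rbx (0x1164a3), rbp, rsp.
      0x1164c7 (cut307)  reads eax (spilled to `[R + 18H]`, stored as a byte AND tested from the spill 0x116514: all inside R12d: no
                         constraint), rbx, r12 (= j: 0x1164cb 0x1164da 0x1164e7), r15 (= m + 11H + j: 0x1164df), r13d (0x116541), rbp, rsp.
  All labels exist in Vorbis/Labels.lean (cut305, cut306, cut307, cut310 = loop40): nothing for `AT`.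

  FROM THE FARM'S REPORT (work/start_decoder.R12.1/Lemmas.lean): `InR12` = its proposed `AtR12j` in the tree's vocabulary (`MapLoop` +
  `MapCur … 12` + r13 + the prefix of MP6; its `Geo` / `R12Inv.frame` are `SecPt.pos` / `MapLoop.carry`'s business); `R12.maps_succ` =
  its `R12Inv.maps_succ` (the exit `++i`); the measure `16 − j` is its. Its frame lemma `R12Inv.transfer` is `MapLoop.carry`
  (Vorbis/Spec/StartDecoderMapMode.lean) + the segment's own clauses. Hints: farm/hints/start_decoder.R12.md.
-/
import Vorbis.Spec.StartDecoderMapMode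
namespace Vorbis.Spec.StartDecoder
open X86 X86.User Asan

/-! ### The assertions at the cut points -/

/-- **A POINT INSIDE SEGMENT R12** at the program counter `pc`, with `j` submaps finished: `BodyR12` with a free program counter and a
free counter (the mapping loop's record, `rbx = m(i)`, the record under construction at stage 12: MP2 – MP5), and MP6 for the
submaps below `j`. -/
structure InR12 (u₀ : State) (g : Ghost) (pc : Word) (i j : Nat) (A7 A7c Ai : Arena) (A : Arena × List Obj) (v : State) :
    Prop where
  /-- the invariant of the mapping loop 4095 at `pc` -/
  loop : MapLoop u₀ g pc i A7 A7c Ai A v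
  /-- rbx = m(i) (read 0x116545 0x1164a3 0x1164b5 0x1164cb 0x1164da 0x1164e7; callee-saved over get_bits) -/
  rbx : v.reg .rbx = addr (mapAt g v.mem i)
  /-- MP2 – MP5 of the record under construction (`submaps`, `chan`, `coupling_steps` are not rewritten in R12) -/
  cur : MapCur g (Since Ai A.1) v.mem i 12
  /-- r13 = j, the whole register (`BodyR12.r13`; `add r13d, 1` 0x116541 zero-extends; read 0x116549, 0x1164a0) -/
  r13 : v.reg .r13 = addr j
  /-- the counter is at most `submaps` (≤ 16) -/
  j_le : j ≤ Mapping.submaps v.mem (mapAt g v.mem i)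
  /-- MP6 for the submaps below the counter (submap `j` is added by R12d's two tests) -/
  done : ∀ s : Nat, s < j → Mapping.SubmapOK v.mem g.f (mapAt g v.mem i) s

/-- **cut310 = loop40 (0x116545), the head of the submap loop** with `j` submaps finished. `AtR12h u₀ g i j v`: an exit assertion of
`start_decoder.R12d` (j + 1), the entry assertion of `start_decoder.R12a` (`AtR12` is `AtR12h … 0`: `R12.of_body`). -/
def AtR12h (u₀ : State) (g : Ghost) (i j : Nat) (v : State) : Prop :=
  ∃ A7 A7c Ai A, InR12 u₀ g L.start_decoder.cut310 i j A7 A7c Ai A v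

/-- **The return of the first or of the second `get_bits(f, 8)` of a round** (`pc` = cut305: eax is discarded; `pc` = cut306: eax is
stored as a byte, re-loaded and tested: no constraint): the point of R12 and `j < submaps` (from `jg` 0x11654c). -/
structure BodyR12m (u₀ : State) (g : Ghost) (pc : Word) (i j : Nat) (A7 A7c Ai : Arena) (A : Arena × List Obj) (v : State) :
    Prop where
  /-- the point at `pc` -/
  pt : InR12 u₀ g pc i j A7 A7c Ai A v
  /-- the loop test passed: submap `j` exists (so `m + 11H + j`, `m + 21H + j` lie in the record: `j < submaps ≤ 16`) -/
  j_lt : j < Mapping.submaps v.mem (mapAt g v.mem i)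

/-- **cut305 (0x11648f)**. `AtR12a u₀ g i j v`: an exit assertion of `start_decoder.R12a`, the entry assertion of `start_decoder.R12b`. -/
def AtR12a (u₀ : State) (g : Ghost) (i j : Nat) (v : State) : Prop :=
  ∃ A7 A7c Ai A, BodyR12m u₀ g L.start_decoder.cut305 i j A7 A7c Ai A v

/-- **cut306 (0x11649c)**. `AtR12b u₀ g i j v`: the exit assertion of `start_decoder.R12b`, the entry assertion of `start_decoder.R12c`. -/
def AtR12b (u₀ : State) (g : Ghost) (i j : Nat) (v : State) : Prop :=
  ∃ A7 A7c Ai A, BodyR12m u₀ g L.start_decoder.cut306 i j A7 A7c Ai A v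

/-- **cut307 (0x1164c7), the return of the third `get_bits(f, 8)`** (submap_residue; eax is spilled, stored and tested inside R12d:
no constraint): the point of R12, `j < submaps`, and the two registers R12c computed. -/
structure BodyR12c (u₀ : State) (g : Ghost) (i j : Nat) (A7 A7c Ai : Arena) (A : Arena × List Obj) (v : State) : Prop where
  /-- the point at cut307 -/
  pt : InR12 u₀ g L.start_decoder.cut307 i j A7 A7c Ai A v
  /-- submap `j` exists -/
  j_lt : j < Mapping.submaps v.mem (mapAt g v.mem i)
  /-- r12 = j (`movsxd r12, r13d` 0x1164a0, j < 16: no sign; read 0x1164cb 0x1164da 0x1164e7; callee-saved over get_bits) -/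
  r12 : v.reg .r12 = addr j
  /-- r15 = m + 11H + j, the address of `submap_floor[j]` (`lea r15, [rbx + r12 + 11H]` 0x1164a3; read 0x1164df as the address of the
  checked load1; callee-saved over get_bits) -/
  r15 : v.reg .r15 = addr (mapAt g v.mem i + j + 0x11)

/-- `AtR12c u₀ g i j v`: the exit assertion of `start_decoder.R12c`, the entry assertion of `start_decoder.R12d`. -/
def AtR12c (u₀ : State) (g : Ghost) (i j : Nat) (v : State) : Prop := ∃ A7 A7c Ai A, BodyR12c u₀ g i j A7 A7c Ai A v

/-! ### The claims of the children -/

/-- **Segment `start_decoder.R12a`** (0x116545 – 0x11654c, 0x116482 – 0x11648a, 0x116552 – 0x11655a): the loop test; `j ≥ submaps`: the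
record is complete, `++i`, R8 with `i + 1`; else the discarded `get_bits(f, 8)`; exit at its return (cut305). -/
def SegR12a (Lay : Layout) (μ : Microarch) (u₀ : State) : Prop :=
  ∀ (g : Ghost) (i j : Nat) (v : State), AtR12h u₀ g i j v →
    ReachVia Lay μ WayInv v (fun w => AtR8 u₀ g (i + 1) w ∨ AtR12a u₀ g i j w)

/-- **Segment `start_decoder.R12b`** (0x11648f – 0x116497): the second `get_bits(f, 8)`; exit at its return (cut306). -/
def SegR12b (Lay : Layout) (μ : Microarch) (u₀ : State) : Prop :=
  ∀ (g : Ghost) (i j : Nat) (v : State), AtR12a u₀ g i j v → ReachVia Lay μ WayInv v (fun w => AtR12b u₀ g i j w)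

/-- **Segment `start_decoder.R12c`** (0x11649c – 0x1164c2): `submap_floor[j]` (checked store1 at `m + 11H + j`), the third
`get_bits(f, 8)`; exit at its return (cut307). -/
def SegR12c (Lay : Layout) (μ : Microarch) (u₀ : State) : Prop :=
  ∀ (g : Ghost) (i j : Nat) (v : State), AtR12b u₀ g i j v → ReachVia Lay μ WayInv v (fun w => AtR12c u₀ g i j w)

/-- **Segment `start_decoder.R12d`** (0x1164c7 – 0x116541): `submap_residue[j]` (checked store1 at `m + 21H + j`), the two tests of
lines 4136 / 4137 (each failing into `error(f, VORBIS_invalid_setup)`, `jmp` to the epilogue), `++j`; exit at the head with `j + 1`. -/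
def SegR12d (Lay : Layout) (μ : Microarch) (u₀ : State) : Prop :=
  ∀ (g : Ghost) (i j : Nat) (v : State), AtR12c u₀ g i j v →
    ReachVia Lay μ WayInv v (fun w => AtR12h u₀ g i (j + 1) w ∨ AtERR u₀ g w)

/-! ### The hand-over lemmas of the cut assertions (pure logic; from the farm worker's Lemmas.lean) -/

namespace R12

/-- **The entry of the segment**: `AtR12` is the head's assertion with no submap finished (`BodyR12.r13 : r13 = addr 0`; `pc_R12` is
cut310). -/
theorem of_body {u₀ : State} {g : Ghost} {i : Nat} {v : State} (h : AtR12 u₀ g i v) : AtR12h u₀ g i 0 v := by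
  obtain ⟨A7, A7c, Ai, A, hb⟩ := h
  refine ⟨A7, A7c, Ai, A, ?_⟩
  exact
    { loop := hb.loop
      rbx := hb.rbx
      cur := hb.cur
      r13 := hb.r13
      j_le := Nat.zero_le _
      done := fun s hs => absurd hs (Nat.not_lt_zero s) }

/-- **The exit of the submap loop** (`submaps ≤ j` at 0x116552; the worker's `R12Inv.maps_succ`): record `i` is complete — MP2 – MP5
from `MapCur … 12`, MP6 from the prefix —, so MAPS(i + 1) holds with the PRESENT arena as the snapshot of the next iteration (the
`chan` block of record `i`, allocated since `Ai`, was allocated since `A7c`). Memory-level: apply it to the memory AFTER the `add`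
on `[R + 10H]` (carry `MapTrans`, `MapCur`, the prefix there first), then `cnt = i + 1` from the stored value. -/
theorem maps_succ {g : Ghost} {i j : Nat} {A7 A7c Ai : Arena} {A : Arena × List Obj} {mem : Mem}
    (hmaps : MapTrans A7 A7c Ai A.1 mem g.f i) (hcur : MapCur g (Since Ai A.1) mem i 12)
    (hdone : ∀ s : Nat, s < j → Mapping.SubmapOK mem g.f (mapAt g mem i) s)
    (hexit : Mapping.submaps mem (mapAt g mem i) ≤ j) : MapTrans A7 A7c A.1 A.1 mem g.f (i + 1) := by
  have hlt := hcur.lt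
  refine ⟨hmaps.ext7, hmaps.ext7c.trans hmaps.exti, Arena.Extends.refl _, by omega, hmaps.MP1, hmaps.MP1_block, ?_⟩
  intro i' hi'
  by_cases e : i' = i
  · subst e
    have hrec : MappingAtOK (Since A7c A.1) mem g.f (mapAt g mem i') :=
      { MP2 := hcur.MP2.older hmaps.ext7c
        MP3 := hcur.MP3
        MP4_steps := hcur.MP4_steps
        MP4 := hcur.MP4 (by omega)
        MP5 := hcur.MP5 (by omega)
        MP6 := fun s hs => hdone s (by omega) }
    exact hrec
  · exact MappingAtOK.mono (hmaps.record i' (by omega)) (fun _ hB => hB.mono hmaps.exti)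

/-- **One more submap is finished** (the two tests of lines 4136 / 4137 passed): from the pieces at the head's state, r13 = j + 1. -/
theorem succ {u₀ : State} {g : Ghost} {pc : Word} {i j : Nat} {A7 A7c Ai : Arena} {A : Arena × List Obj} {v : State}
    (hl : MapLoop u₀ g pc i A7 A7c Ai A v) (hrbx : v.reg .rbx = addr (mapAt g v.mem i))
    (hcur : MapCur g (Since Ai A.1) v.mem i 12) (hr : v.reg .r13 = addr (j + 1))
    (hj : j < Mapping.submaps v.mem (mapAt g v.mem i))
    (hdone : ∀ s : Nat, s < j → Mapping.SubmapOK v.mem g.f (mapAt g v.mem i) s)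
    (hc : Mapping.SubmapOK v.mem g.f (mapAt g v.mem i) j) : InR12 u₀ g pc i (j + 1) A7 A7c Ai A v := by
  refine ⟨hl, hrbx, hcur, hr, hj, ?_⟩
  intro s hs
  by_cases e : s = j
  · rw [e]
    exact hc
  · exact hdone s (by omega)

/-- **The counter is below 16 while a submap is left**: `j < submaps ≤ 16` (MP3). -/
theorem j_lt16 {u₀ : State} {g : Ghost} {pc : Word} {i j : Nat} {A7 A7c Ai : Arena} {A : Arena × List Obj} {v : State}
    (h : InR12 u₀ g pc i j A7 A7c Ai A v) (hj : j < Mapping.submaps v.mem (mapAt g v.mem i)) : j < 16 := by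
  have h3 := h.cur.MP3
  omega

end R12

/-! ### The composition -/

/-- **THE COMPOSITION of the split of segment R12**: `AtR12` is the head with `j = 0`; `ReachVia.loop` on the head with the invariant
`∃ j, AtR12h … j` and the measure `16 − r13`: one round = a → b → c → d; the measure decreases because `j < submaps ≤ 16` at cut305
and r13 goes from `j` to `j + 1`. Pure logic: no machine step. -/
theorem SegR12.of_parts {Lay : Layout} {μ : Microarch} {u₀ : State}
    (ha : SegR12a Lay μ u₀) (hb : SegR12b Lay μ u₀) (hc : SegR12c Lay μ u₀) (hd : SegR12d Lay μ u₀) : SegR12 Lay μ u₀ := by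
  intro g i v hv
  refine ReachVia.loop (Inv := fun x => ∃ j, AtR12h u₀ g i j x) (fun x => 16 - (x.reg .r13).toNat) ?_ v ⟨0, R12.of_body hv⟩
  intro x hx
  obtain ⟨j, hxj⟩ := hx
  have hrx : x.reg .r13 = addr j := by
    obtain ⟨_, _, _, _, hin⟩ := hxj
    exact hin.r13
  refine (ha g i j x hxj).trans ?_
  intro y hy
  rcases hy with h8 | hya
  · exact ReachVia.done (Or.inl (Or.inl h8))
  · have hj16 : j < 16 := by
      obtain ⟨_, _, _, _, hbody⟩ := hya
      exact R12.j_lt16 hbody.pt hbody.j_lt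
    refine (hb g i j y hya).trans ?_
    intro z hz
    refine (hc g i j z hz).trans ?_
    intro t ht
    refine (hd g i j t ht).trans ?_
    intro r hr
    rcases hr with hnext | herr
    · have hrr : r.reg .r13 = addr (j + 1) := by
        obtain ⟨_, _, _, _, hin⟩ := hnext
        exact hin.r13
      refine ReachVia.done (Or.inr ⟨⟨j + 1, hnext⟩, ?_⟩)
      show 16 - (r.reg .r13).toNat < 16 - (x.reg .r13).toNat
      rw [hrr, hrx, toNat_addr _ (by omega), toNat_addr _ (by omega)]
      omega
    · exact ReachVia.done (Or.inl (Or.inr herr))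

end Vorbis.Spec.StartDecoder
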